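-- pv_equiv track=rewrite | github.com/SagarDhok/CodeDaily | GeeksOfGeeks/day-92.py | getDigitDiff1AndLessK
-- ===== SOURCE A (Python) =====
-- def getDigitDiff1AndLessK(arr, k):
--
--     result = []
--
--     for i in arr:
--         if i<10 or i>=k:
--             continue
--
--
--         val = i
--         pre_digit = val%10
--         val//=10
--
--         valid = True
--
--         while val>0:
--             cur_digit = val%10
--             diff= cur_digit-pre_digit
--
--             if diff!=1 and diff!=-1:
--               valid = False
--               break
--
--             pre_digit = cur_digit
--             val//=10
--
--         if valid:
--             result.append(i)
--
--     return result
-- ===== SOURCE B (Python) =====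
-- def getDigitDiff1AndLessK(arr, k):
--     def ok(i):
--         s = str(i)
--         return all(abs(ord(a) - ord(b)) == 1 for a, b in zip(s, s[1:]))
--     return [i for i in arr if 10 <= i < k and ok(i)]
-- ===== Notes on version B (the rewrite author's own statement) =====
-- stated objective: idiomatic
-- what changed: B filters with a comprehension and tests the digit condition on the characters of str(i) most-significant-first via all() over zipped adjacent character pairs, instead of A's least-significant-first %10-//10 while-loop with a valid flag and break.
import Mathlib
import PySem

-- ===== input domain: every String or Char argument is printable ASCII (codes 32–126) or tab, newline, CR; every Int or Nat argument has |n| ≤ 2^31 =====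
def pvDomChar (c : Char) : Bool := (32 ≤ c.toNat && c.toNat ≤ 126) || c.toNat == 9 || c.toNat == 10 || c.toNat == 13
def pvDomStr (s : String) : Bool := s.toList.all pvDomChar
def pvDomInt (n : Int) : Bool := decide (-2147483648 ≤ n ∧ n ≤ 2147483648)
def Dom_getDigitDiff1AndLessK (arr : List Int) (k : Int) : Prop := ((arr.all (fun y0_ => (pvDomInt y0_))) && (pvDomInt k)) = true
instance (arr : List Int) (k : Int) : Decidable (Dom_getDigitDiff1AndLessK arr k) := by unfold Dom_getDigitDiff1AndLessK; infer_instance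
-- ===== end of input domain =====

-- B re-tests the digit condition on the characters of str(i) (most-significant first,
-- via zip/all over adjacent characters) inside a filtering comprehension, instead of
-- A's least-significant-first %10 // 10 while-loop with a flag and break; same cost (idiomatic rewrite).

-- ===== PORT A =====
-- the 'while val>0' loop of A: state (pre_digit, val); returns 'valid'
-- (A's locals cur = val%10 and diff = cur - pre_digit are written inline)
def pvLoopA (pre val : Int) : Bool :=
  if _h : val > 0 then
    if PySem.Int.mod val 10 - pre ≠ 1 ∧ PySem.Int.mod val 10 - pre ≠ -1 then false
    else pvLoopA (PySem.Int.mod val 10) (PySem.Int.floordiv val 10)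
  else true
termination_by val.toNat
decreasing_by
  simp only [PySem.Int.floordiv]
  rw [Int.fdiv_eq_ediv]
  simp only [show ((0:Int) ≤ 10 ∨ (10:Int) ∣ val) = True by simp, if_true]
  omega

def getDigitDiff1AndLessK (arr : List Int) (k : Int) : List Int :=
  arr.foldl (fun result i =>
    if i < 10 ∨ i ≥ k then result
    else
      let pre := PySem.Int.mod i 10
      let val := PySem.Int.floordiv i 10
      if pvLoopA pre val then result ++ [i] else result) []

-- ===== PORT B =====
-- ok(i) of Source B: s = str(i); all adjacent character pairs of s differ by 1 in code point
-- (s[1:] is, at character level, exactly List.drop 1)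
def pvOkB (i : Int) : Bool :=
  let s := (PySem.Int.toStr i).toList
  (s.zip (s.drop 1)).all (fun ab => ((ab.1.toNat : Int) - (ab.2.toNat : Int)).natAbs == 1)

def getDigitDiff1AndLessK_alt (arr : List Int) (k : Int) : List Int :=
  arr.filter (fun i => decide (10 ≤ i) && decide (i < k) && pvOkB i)

-- ===== PRECONDITION & SPEC =====
def Spec_getDigitDiff1AndLessK (arr : List Int) (k : Int) (out : List Int) : Prop := out = getDigitDiff1AndLessK_alt arr k
instance (arr : List Int) (k : Int) (out : List Int) : Decidable (Spec_getDigitDiff1AndLessK arr k out) := by unfold Spec_getDigitDiff1AndLessK; infer_instance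

-- ===== CLAIM (what is proved, stated in full; the proofs are below) =====
def Claim_equal_getDigitDiff1AndLessK : Prop := ∀ (arr : List Int) (k : Int), Dom_getDigitDiff1AndLessK arr k → Spec_getDigitDiff1AndLessK arr k (getDigitDiff1AndLessK arr k)

-- ===== LEMMAS AND PROOFS =====

-- least-significant-first base-10 digits of a natural number
def pvLsf (n : Nat) : List Nat :=
  if h : n = 0 then [] else n % 10 :: pvLsf (n / 10)
decreasing_by omega

-- adjacency check over a list, as B writes it (zip with the tail)
def pvChain {α : Type} (p : α → α → Bool) (l : List α) : Bool :=
  (l.zip (l.drop 1)).all (fun ab => p ab.1 ab.2)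

lemma pvChain_cons_cons {α : Type} (p : α → α → Bool) (a b : α) (t : List α) :
    pvChain p (a :: b :: t) = (p a b && pvChain p (b :: t)) := rfl

lemma pvChain_iff_isChain {α : Type} (p : α → α → Bool) (l : List α) :
    pvChain p l = true ↔ List.IsChain (fun a b => p a b = true) l := by
  induction l with
  | nil => simp [pvChain]
  | cons a t ih =>
    cases t with
    | nil => simp [pvChain]
    | cons b t' =>
      rw [pvChain_cons_cons, List.isChain_cons_cons, Bool.and_eq_true, ih]

lemma pvChain_reverse {α : Type} (p : α → α → Bool) (hsym : ∀ a b, p a b = p b a)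
    (l : List α) : pvChain p l.reverse = pvChain p l := by
  rw [Bool.eq_iff_iff, pvChain_iff_isChain, pvChain_iff_isChain, List.isChain_reverse]
  constructor <;> (intro h; refine h.imp ?_; intro a b hh; rw [hsym]; exact hh)

def pvPInt (a b : Int) : Bool := (a - b).natAbs == 1
def pvPChar (a b : Char) : Bool := ((a.toNat : Int) - (b.toNat : Int)).natAbs == 1

lemma pvLsf_lt_ten (n : Nat) : ∀ d ∈ pvLsf n, d < 10 := by
  induction n using Nat.strong_induction_on with
  | _ n ih =>
    rw [pvLsf]
    split
    · simp
    · rename_i h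
      intro d hd
      rcases List.mem_cons.mp hd with h1 | h2
      · omega
      · exact ih (n / 10) (by omega) d h2

lemma pvMod10 (n : Nat) : PySem.Int.mod (n : Int) 10 = ((n % 10 : Nat) : Int) := by
  simp only [PySem.Int.mod]
  rw [Int.fmod_eq_emod]
  simp only [show ((0:Int) ≤ 10 ∨ (10:Int) ∣ (n:Int)) = True by simp, if_true]
  push_cast
  ring

lemma pvDiv10 (n : Nat) : PySem.Int.floordiv (n : Int) 10 = ((n / 10 : Nat) : Int) := by
  simp only [PySem.Int.floordiv]
  rw [Int.fdiv_eq_ediv]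
  simp only [show ((0:Int) ≤ 10 ∨ (10:Int) ∣ (n:Int)) = True by simp, if_true]
  push_cast
  ring

-- A's while loop computes the adjacency check over pre :: (LSF digits of val)
lemma pvLoopA_eq_chain (n : Nat) (pre : Int) :
    pvLoopA pre (n : Int) = pvChain pvPInt (pre :: (pvLsf n).map (Nat.cast : Nat → Int)) := by
  induction n using Nat.strong_induction_on generalizing pre with
  | _ n ih =>
    rw [pvLoopA.eq_def, pvLsf]
    by_cases h0 : n = 0
    · simp [h0, pvChain]
    · have hpos : (n : Int) > 0 := by exact_mod_cast Nat.pos_of_ne_zero h0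
      rw [dif_pos hpos, dif_neg h0]
      have hmod : PySem.Int.mod (n : Int) 10 = ((n % 10 : Nat) : Int) := pvMod10 n
      have hdiv : PySem.Int.floordiv (n : Int) 10 = ((n / 10 : Nat) : Int) := pvDiv10 n
      rw [List.map_cons, pvChain_cons_cons, hmod, hdiv,
        ih (n / 10) (by omega) ((n % 10 : Nat) : Int)]
      by_cases hp : pvPInt pre ((n % 10 : Nat) : Int) = true
      · have : ¬(((n % 10 : Nat) : Int) - pre ≠ 1 ∧ ((n % 10 : Nat) : Int) - pre ≠ -1) := by
          simp only [pvPInt, beq_iff_eq] at hp; omega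
        rw [if_neg this, hp, Bool.true_and]
      · have : (((n % 10 : Nat) : Int) - pre ≠ 1 ∧ ((n % 10 : Nat) : Int) - pre ≠ -1) := by
          simp only [pvPInt, beq_iff_eq] at hp; omega
        rw [if_pos this, Bool.eq_false_iff.mpr hp, Bool.false_and]

lemma pvToDigitsCore_succ (b f n : Nat) (ds : List Char) :
    Nat.toDigitsCore b (f + 1) n ds =
      (if n / b = 0 then (n % b).digitChar :: ds
       else Nat.toDigitsCore b f (n / b) ((n % b).digitChar :: ds)) := rfl

lemma pvToDigitsCore_eq (f : Nat) : ∀ (n : Nat) (ds : List Char), 0 < n → n < f →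
    Nat.toDigitsCore 10 f n ds = ((pvLsf n).map Nat.digitChar).reverse ++ ds := by
  induction f with
  | zero => intro n ds h1 h2; omega
  | succ f ih =>
    intro n ds h1 h2
    rw [pvToDigitsCore_succ, pvLsf, dif_neg (by omega)]
    by_cases hz : n / 10 = 0
    · rw [if_pos hz, pvLsf, dif_pos hz]
      simp
    · rw [if_neg hz, ih (n / 10) _ (by omega) (by omega)]
      simp

lemma pvToChars_eq (n : Nat) (h : 0 < n) :
    PySem.Int.toChars (n : Int) = ((pvLsf n).map Nat.digitChar).reverse := by
  have : ¬ ((n : Int) < 0) := by omega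
  simp only [PySem.Int.toChars, if_neg this, Int.toNat_natCast, Nat.toDigits]
  rw [pvToDigitsCore_eq (n + 1) n [] h (by omega)]
  simp

lemma pvDigitChar_toNat (d : Nat) (h : d < 10) : (Nat.digitChar d).toNat = 48 + d := by
  interval_cases d <;> decide

lemma pvChain_map_digitChar (ds : List Nat) (h : ∀ d ∈ ds, d < 10) :
    pvChain pvPChar (ds.map Nat.digitChar) = pvChain pvPInt (ds.map (Nat.cast : Nat → Int)) := by
  induction ds with
  | nil => rfl
  | cons a t ih =>
    cases t with
    | nil => rfl
    | cons b t' =>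
      show (pvPChar a.digitChar b.digitChar && pvChain pvPChar (List.map Nat.digitChar (b :: t')))
        = (pvPInt (a : Int) (b : Int) && pvChain pvPInt (List.map (Nat.cast : Nat → Int) (b :: t')))
      rw [ih (fun d hd => h d (List.mem_cons_of_mem a hd))]
      have ha : a < 10 := h a (by simp)
      have hb : b < 10 := h b (by simp)
      have : pvPChar a.digitChar b.digitChar = pvPInt (a : Int) (b : Int) := by
        simp only [pvPChar, pvPInt, pvDigitChar_toNat a ha, pvDigitChar_toNat b hb]
        congr 1
        push_cast
        omega
      rw [this]

lemma pvPChar_symm (a b : Char) : pvPChar a b = pvPChar b a := by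
  simp only [pvPChar]
  congr 1
  omega

-- per-element agreement of the two kept-tests, for i ≥ 10
lemma pvCheck_agree (i : Int) (h : 10 ≤ i) :
    pvLoopA (PySem.Int.mod i 10) (PySem.Int.floordiv i 10) = pvOkB i := by
  set n := i.toNat with hn
  have hi : i = (n : Int) := by omega
  have hmod : PySem.Int.mod i 10 = ((n % 10 : Nat) : Int) := by rw [hi]; exact pvMod10 n
  have hdiv : PySem.Int.floordiv i 10 = ((n / 10 : Nat) : Int) := by rw [hi]; exact pvDiv10 n
  have hlsf : pvLsf n = n % 10 :: pvLsf (n / 10) := by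
    rw [pvLsf]; rw [dif_neg (by omega)]
  rw [hmod, hdiv, pvLoopA_eq_chain (n / 10) _]
  have hok : pvOkB i = pvChain pvPChar (PySem.Int.toChars (n : Int)) := by
    simp only [pvOkB, hi, PySem.Int.toList_toStr]
    rfl
  rw [hok, pvToChars_eq n (by omega),
    pvChain_reverse pvPChar pvPChar_symm,
    pvChain_map_digitChar (pvLsf n) (pvLsf_lt_ten n), hlsf, List.map_cons]

-- the foldl-with-append of A is the filter of B, for pointwise-agreeing tests
lemma pvFoldl_filter (p : Int → Bool) (arr : List Int) (acc : List Int)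
    (body : List Int → Int → List Int)
    (hbody : ∀ r i, body r i = if p i then r ++ [i] else r) :
    arr.foldl body acc = acc ++ arr.filter p := by
  induction arr generalizing acc with
  | nil => simp
  | cons a t ih =>
    rw [List.foldl_cons, hbody, List.filter_cons]
    by_cases hp : p a = true
    · rw [if_pos hp, if_pos hp, ih]; simp
    · rw [if_neg hp, if_neg (by simp [hp]), ih]

-- ===== VERDICT (by name: the statement is the Claim_ definition above) =====
theorem getDigitDiff1AndLessK_spec : Claim_equal_getDigitDiff1AndLessK := by
  intro arr k _
  unfold Spec_getDigitDiff1AndLessK getDigitDiff1AndLessK getDigitDiff1AndLessK_alt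
  rw [pvFoldl_filter (fun i => decide (10 ≤ i) && decide (i < k) && pvOkB i) arr []]
  · simp
  · intro r i
    by_cases hg : i < 10 ∨ i ≥ k
    · rw [if_pos hg]
      have : (decide (10 ≤ i) && decide (i < k) && pvOkB i) = false := by
        rcases hg with h | h
        · simp [show ¬ (10 ≤ i) by omega]
        · simp [show ¬ (i < k) by omega]
      rw [this]
      simp
    · rw [if_neg hg]
      rw [not_or] at hg
      rw [not_lt, not_le] at hg
      have h10 : 10 ≤ i := hg.1
      show (if pvLoopA (PySem.Int.mod i 10) (PySem.Int.floordiv i 10) = true then r ++ [i] else r) = _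
      rw [pvCheck_agree i h10]
      have : (decide (10 ≤ i) && decide (i < k) && pvOkB i) = pvOkB i := by
        simp [h10, hg.2]
      rw [this]
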